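-- pv_equiv track=rewrite | github.com/Denubis/letterfreq | letterfreq/grouping.py | exemplar
-- ===== SOURCE A (Python) =====
-- from collections.abc import Iterable
--
-- def exemplar(words: Iterable[str], us_dict: frozenset[str]) -> str:
--     """Return the first dict-resident word alphabetically, or first alphabetically.
--
--     Used as the visible row when a bucket collapses multiple tied words into
--     a single table entry. The cascade means recognisable forms (e.g. `preambling`)
--     surface as the exemplar rather than alphabetically-earliest obscurities
--     (e.g. `preallying`), except when an entire bucket is non-dict, in which
--     case the bucket is all-obscure anyway and alphabetical order is the best
--     deterministic choice.
--
--     Raises ValueError on empty input.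
--     """
--     word_list = list(words)
--     if not word_list:
--         raise ValueError("exemplar requires at least one word")
--     in_dict_sorted = sorted(w for w in word_list if w in us_dict)
--     if in_dict_sorted:
--         return in_dict_sorted[0]
--     return sorted(word_list)[0]
-- ===== SOURCE B (Python) =====
-- def exemplar(words, us_dict):
--     """Single pass: track least word overall and least dict-resident word."""
--     best_any = None
--     best_dict = None
--     for w in words:
--         if best_any is None or w < best_any:
--             best_any = w
--         if w in us_dict and (best_dict is None or w < best_dict):
--             best_dict = w
--     if best_any is None:
--         raise ValueError("exemplar requires at least one word")
--     return best_dict if best_dict is not None else best_any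
-- ===== Notes on version B (the rewrite author's own statement) =====
-- stated objective: alternative
-- what changed: Replaces the two sorted() passes (build filtered list, sort it, maybe sort the whole list again) by one fused loop over the words maintaining two running minima (least word overall, least dict word), returning the dict minimum if one was seen.
import Mathlib
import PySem

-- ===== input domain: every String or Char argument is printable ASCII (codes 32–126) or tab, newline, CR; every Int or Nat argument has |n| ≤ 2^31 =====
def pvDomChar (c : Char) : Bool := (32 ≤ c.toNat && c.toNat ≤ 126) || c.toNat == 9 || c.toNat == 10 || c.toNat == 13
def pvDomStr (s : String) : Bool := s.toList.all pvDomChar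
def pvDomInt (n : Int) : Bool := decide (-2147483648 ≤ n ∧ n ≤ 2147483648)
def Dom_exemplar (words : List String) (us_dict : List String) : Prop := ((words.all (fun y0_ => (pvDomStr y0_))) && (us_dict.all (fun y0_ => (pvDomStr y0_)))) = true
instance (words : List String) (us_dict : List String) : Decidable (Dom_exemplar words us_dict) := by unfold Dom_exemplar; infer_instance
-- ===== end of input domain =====

-- B replaces A's sort-then-take-head passes by one fused loop keeping two running minima (alternative single-pass decomposition).


-- ===== PORT A =====
def exemplar (words : List String) (us_dict : List String) : String :=
  -- word_list = list(words); empty input raises ValueError (excluded by Pre_)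
  let in_dict_sorted := PySem.List.sorted (words.filter (fun w => us_dict.contains w)) (fun x => x) false
  match in_dict_sorted with
  | w :: _ => w
  | [] => (PySem.List.sorted words (fun x => x) false).headD ""

-- ===== PORT B =====
-- one step of B's running minimum: 'b is None or w < b'
def exAltStep (acc : Option String) (w : String) : Option String :=
  match acc with
  | none => some w
  | some b => if w < b then some w else some b

def exemplar_alt (words : List String) (us_dict : List String) : String :=
  let st := words.foldl
    (fun (acc : Option String × Option String) w =>
      (exAltStep acc.1 w,
       if us_dict.contains w then exAltStep acc.2 w else acc.2))
    (none, none)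
  match st.2 with
  | some d => d
  | none => st.1.getD ""   -- best_any is None only on empty input (raises, outside Pre_)

-- ===== PRECONDITION & SPEC =====
-- A raises ValueError on an empty word list; Pre_ excludes exactly that input.
def Pre_exemplar (words : List String) (us_dict : List String) : Prop := words ≠ []
instance (words : List String) (us_dict : List String) : Decidable (Pre_exemplar words us_dict) := by unfold Pre_exemplar; infer_instance
def pvWitness_exemplar : List String × List String := (["cat", "dog"], ["dog"])

def Spec_exemplar (words : List String) (us_dict : List String) (out : String) : Prop := out = exemplar_alt words us_dict
instance (words : List String) (us_dict : List String) (out : String) : Decidable (Spec_exemplar words us_dict out) := by unfold Spec_exemplar; infer_instance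

-- ===== CLAIM (what is proved, stated in full; the proofs are below) =====
def Claim_equal_exemplar : Prop := ∀ (words : List String) (us_dict : List String), Dom_exemplar words us_dict → Pre_exemplar words us_dict → Spec_exemplar words us_dict (exemplar words us_dict)

-- ===== LEMMAS AND PROOFS =====

-- B's pair fold splits into two independent running-minimum folds.
theorem exAlt_fold_split (words us_dict : List String) (a d : Option String) :
    words.foldl
      (fun (acc : Option String × Option String) w =>
        (exAltStep acc.1 w,
         if us_dict.contains w then exAltStep acc.2 w else acc.2))
      (a, d)
    = (words.foldl exAltStep a,
       (words.filter (fun w => us_dict.contains w)).foldl exAltStep d) := by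
  induction words generalizing a d with
  | nil => rfl
  | cons w t ih =>
    simp only [List.foldl_cons, List.filter_cons]
    by_cases h : us_dict.contains w = true
    · simp only [h, if_true]
      exact ih _ _
    · simp only [h, if_false, Bool.false_eq_true]
      exact ih _ _

theorem exAltStep_run_none (xs : List String) : xs.foldl exAltStep none = none ↔ xs = [] := by
  cases xs with
  | nil => simp
  | cons x t =>
    constructor
    · intro h
      exfalso
      have : ∀ (b : String) (l : List String), l.foldl exAltStep (some b) ≠ none := by
        intro b l
        induction l generalizing b with
        | nil => simp
        | cons y t ih => simp only [List.foldl_cons, exAltStep]; split <;> exact ih _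
      exact this x t (by simpa [exAltStep] using h)
    · intro h; simp at h

-- the running minimum is a member and a lower bound
theorem exAltStep_run_min (xs : List String) (b : String) (r : String)
    (h : xs.foldl exAltStep (some b) = some r) :
    (r = b ∨ r ∈ xs) ∧ r ≤ b ∧ ∀ y ∈ xs, r ≤ y := by
  induction xs generalizing b with
  | nil =>
    simp at h
    exact ⟨Or.inl h.symm, le_of_eq h.symm, by simp⟩
  | cons x t ih =>
    simp only [List.foldl_cons, exAltStep] at h
    by_cases hx : x < b
    · rw [if_pos hx] at h
      obtain ⟨hm, hb, hall⟩ := ih x h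
      refine ⟨?_, le_trans hb (le_of_lt hx), ?_⟩
      · rcases hm with h1 | h1
        · exact Or.inr (by simp [h1])
        · exact Or.inr (List.mem_cons_of_mem _ h1)
      · intro y hy
        rcases List.mem_cons.mp hy with h1 | h1
        · exact h1 ▸ hb
        · exact hall y h1
    · rw [if_neg hx] at h
      obtain ⟨hm, hb, hall⟩ := ih b h
      refine ⟨?_, hb, ?_⟩
      · rcases hm with h1 | h1
        · exact Or.inl h1
        · exact Or.inr (List.mem_cons_of_mem _ h1)
      · intro y hy
        rcases List.mem_cons.mp hy with h1 | h1
        · exact h1 ▸ le_trans hb (not_lt.mp hx)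
        · exact hall y h1

theorem exAltStep_run_min' (xs : List String) (r : String)
    (h : xs.foldl exAltStep none = some r) :
    r ∈ xs ∧ ∀ y ∈ xs, r ≤ y := by
  cases xs with
  | nil => simp at h
  | cons x t =>
    simp only [List.foldl_cons, exAltStep] at h
    obtain ⟨hm, hb, hall⟩ := exAltStep_run_min t x r h
    refine ⟨?_, ?_⟩
    · rcases hm with h1 | h1
      · simp [h1]
      · exact List.mem_cons_of_mem _ h1
    · intro y hy
      rcases List.mem_cons.mp hy with h1 | h1
      · exact h1 ▸ hb
      · exact hall y h1

-- head of sorted xs equals the running minimum of xs (both are THE least string value)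
theorem sorted_head_eq_run_min (xs : List String) (m : String) (t : List String) (r : String)
    (hs : PySem.List.sorted xs (fun x => x) false = m :: t)
    (hr : xs.foldl exAltStep none = some r) : m = r := by
  obtain ⟨hmem, hmin⟩ := exAltStep_run_min' xs r hr
  have hmmem : m ∈ xs := by
    have := PySem.List.mem_sorted (xs := xs) (key := fun x => x) (rev := false) (x := m)
    rw [hs] at this
    exact this.mp (by simp)
  have h1 : m ≤ r := PySem.List.key_head_sorted_le (xs := xs) (key := fun x => x) hs r hmem
  exact le_antisymm h1 (hmin m hmmem)

-- ===== VERDICT (by name: the statement is the Claim_ definition above) =====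
theorem exemplar_spec : Claim_equal_exemplar := by
  intro words us_dict _ hpre
  unfold Spec_exemplar exemplar exemplar_alt
  rw [exAlt_fold_split]
  simp only []
  rcases hd : (words.filter (fun w => us_dict.contains w)).foldl exAltStep none with _ | r
  · -- no dict word: filter is empty, both take the overall minimum
    have hfe : words.filter (fun w => us_dict.contains w) = [] :=
      (exAltStep_run_none _).mp hd
    rw [hfe]
    have hne : ¬ (words.foldl exAltStep none = none) := by
      rw [exAltStep_run_none]; exact hpre
    rcases ha : words.foldl exAltStep none with _ | r
    · exact absurd ha hne
    · rcases hs : PySem.List.sorted words (fun x => x) false with _ | ⟨m, t⟩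
      · exact absurd ((PySem.List.sorted_eq_nil_iff _ _ _).mp hs) hpre
      · simpa [PySem.List.sorted_eq_nil_iff, hs] using sorted_head_eq_run_min words m t r hs ha
  · -- some dict word: both take the minimum of the filtered list
    rcases hs : PySem.List.sorted (words.filter (fun w => us_dict.contains w)) (fun x => x) false with _ | ⟨m, t⟩
    · have := (PySem.List.sorted_eq_nil_iff _ _ _).mp hs
      rw [this] at hd; simp at hd
    · simpa using sorted_head_eq_run_min _ m t r hs hd
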